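-- pv_equiv track=rewrite | github.com/aquastripe/problem-solving | codeforces/1986 Div3/E.py | solve
-- ===== SOURCE A (Python) =====
-- from collections import defaultdict
--
-- def solve(n, k, a):
--     d = defaultdict(list)
--     a.sort()
--     for a_i in a:
--         d[a_i % k].append(a_i // k)
--
--     ans = 0
--     count_no_pairs = 0
--     for b in d.values():
--         if (len(b) % 2) == 1:
--             if (n % 2) == 0:
--                 return -1
--             else:
--                 count_no_pairs += 1
--
--         if count_no_pairs > 1:
--             return -1
--
--         if (len(b) % 2) == 1:
--             """
--             1 2 3 4 5
--
--             s_0 = -1 +2 -3 +4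
--             s_1 = -1 +2 -3    +5 = s_0 - b[3] + b[4]
--             s_2 = -1 +2    -4 +5 = s_1 + b[2] - b[3]
--             s_3 = -1    +3 -4 +5 = s_2 - b[1] + b[2]
--             s_4 =    -2 +3 -4 +5 = s_3 + b[0] - b[1]
--             """
--             s = 0
--             for i in range(0, len(b) - 1, 2):
--                 s += b[i + 1] - b[i]
--
--             state = 1
--             s_i = s
--             for i in range(len(b) - 1, 0, -1):
--                 s_i = s_i + (b[i] - b[i - 1]) * state
--                 state *= -1
--                 s = min(s, s_i)
--
--             ans += s
--         else:
--             for i in range(0, len(b) - 1, 2):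
--                 ans += b[i + 1] - b[i]
--
--     return ans
-- ===== SOURCE B (Python) =====
-- def solve(n, k, a):
--     a.sort()
--     groups = {}
--     for x in a:
--         groups.setdefault(x % k, []).append(x // k)
--     odd_groups = 0
--     for b in groups.values():
--         odd_groups += len(b) % 2
--     if odd_groups > 1 or (odd_groups == 1 and n % 2 == 0):
--         return -1
--     total = 0
--     for b in groups.values():
--         m = len(b)
--         ev = od = 0
--         for i in range(m - 2, -1, -1):
--             if (m - i) % 2 == 0:
--                 ev = (b[i + 1] - b[i]) + ev
--             else:
--                 od = min(ev, (b[i + 1] - b[i]) + od)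
--         total += od if m % 2 == 1 else ev
--     return total
-- ===== Notes on version B (the rewrite author's own statement) =====
-- stated objective: alternative
-- what changed: Per residue group, A's forward pair-difference sum plus a backward sweep over every deletion candidate (alternating-sum state machine) is replaced by a single right-to-left dynamic program ev/od with recurrence od[i] = min(ev[i+1], (b[i+1]-b[i]) + od[i+2]) that yields both the even-group cost and the odd-group min-deletion cost, and A's early returns are replaced by an upfront count of odd-sized groups.
-- outside the precondition, e.g. on solve(1, 0, [1]): A raises ZeroDivisionError, B raises ZeroDivisionError; on solve(3, -1, [-3, 4, -1]): A returns -7, B returns -5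
import Mathlib
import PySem

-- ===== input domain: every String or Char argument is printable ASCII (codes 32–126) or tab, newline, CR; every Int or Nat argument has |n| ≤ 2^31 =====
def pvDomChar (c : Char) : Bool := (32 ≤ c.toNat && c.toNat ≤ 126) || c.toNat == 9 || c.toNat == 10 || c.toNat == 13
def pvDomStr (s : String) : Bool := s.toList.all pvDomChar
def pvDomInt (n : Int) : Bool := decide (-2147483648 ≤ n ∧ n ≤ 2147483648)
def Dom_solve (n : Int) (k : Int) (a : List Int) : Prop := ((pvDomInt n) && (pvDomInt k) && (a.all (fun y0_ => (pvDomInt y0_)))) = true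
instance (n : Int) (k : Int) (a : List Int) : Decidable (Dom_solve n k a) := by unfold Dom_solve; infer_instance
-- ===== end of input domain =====

-- B replaces A's odd-group candidate sweep (alternating-sum state machine over all deletion
-- positions) by a right-to-left dynamic program min(skip-here, pair-here) that also yields the
-- even-group cost, and replaces A's early returns by an upfront odd-group count; objective:
-- alternative (a different per-group algorithm at similar cost).
-- Both A and B sort `a` in place (a.sort()); the equivalence proved here is about the return value.


-- ===== PORT A =====
-- `for i in range(0, len(b)-1, 2): s += b[i+1] - b[i]` (run on `ans` in the even branch, on 0 for s_0)
def pvPairDiffFold (b : List Int) (s0 : Int) : Int :=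
  (PySem.List.pyRange 0 (PySem.List.len b - 1) 2).foldl
    (fun s i => s + (PySem.List.pyGetD b (i + 1) 0 - PySem.List.pyGetD b i 0)) s0

-- body of A's backward loop: s_i update, `state *= -1`, `s = min(s, s_i)`
def pvStepA (b : List Int) (st : Int × Int × Int) (i : Int) : Int × Int × Int :=
  let s_i := st.1 + (PySem.List.pyGetD b i 0 - PySem.List.pyGetD b (i - 1) 0) * st.2.1
  (s_i, st.2.1 * -1, min st.2.2 s_i)

-- A's odd-length-group block: the initial pairing sum s_0, then the backward state machine
def pvOddA (b : List Int) : Int :=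
  let s := pvPairDiffFold b 0
  ((PySem.List.pyRange (PySem.List.len b - 1) 0 (-1)).foldl (pvStepA b) (s, 1, s)).2.2

-- `for b in d.values(): ...` with A's two early `return -1`s; cnt is count_no_pairs
def pvLoopA (n : Int) : List (List Int) → Int → Int → Int
  | [], ans, _ => ans
  | b :: rest, ans, cnt =>
    if PySem.Int.mod (PySem.List.len b) 2 = 1 then
      if PySem.Int.mod n 2 = 0 then -1
      else if cnt + 1 > 1 then -1
      else pvLoopA n rest (ans + pvOddA b) (cnt + 1)
    else
      if cnt > 1 then -1
      else pvLoopA n rest (pvPairDiffFold b ans) cnt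

def solve (n : Int) (k : Int) (a : List Int) : Int :=
  let aS := PySem.List.sorted a (fun x => x) false
  let d := aS.foldl (fun d x =>
    PySem.Dict.modify d (PySem.Int.mod x k) [] (fun l => l ++ [PySem.Int.floordiv x k]))
    PySem.Dict.empty
  pvLoopA n (PySem.Dict.values d) 0 0

-- ===== PORT B =====
-- body of B's backward DP loop over i: state is (ev, od)
def pvStepG (b : List Int) (m : Int) (st : Int × Int) (i : Int) : Int × Int :=
  if PySem.Int.mod (m - i) 2 = 0 then
    ((PySem.List.pyGetD b (i + 1) 0 - PySem.List.pyGetD b i 0) + st.1, st.2)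
  else
    (st.1, min st.1 ((PySem.List.pyGetD b (i + 1) 0 - PySem.List.pyGetD b i 0) + st.2))

-- `ev = od = 0; for i in range(m-2, -1, -1): ...; od if m % 2 == 1 else ev`
def pvGroupCost (b : List Int) : Int :=
  let m := PySem.List.len b
  let st := (PySem.List.pyRange (m - 2) (-1) (-1)).foldl (pvStepG b m) ((0 : Int), (0 : Int))
  if PySem.Int.mod m 2 = 1 then st.2 else st.1

def solve_alt (n : Int) (k : Int) (a : List Int) : Int :=
  let aS := PySem.List.sorted a (fun x => x) false
  let d := aS.foldl (fun d x =>
    PySem.Dict.modify d (PySem.Int.mod x k) [] (fun l => l ++ [PySem.Int.floordiv x k]))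
    PySem.Dict.empty
  let oddGroups := (PySem.Dict.values d).foldl
    (fun c b => c + PySem.Int.mod (PySem.List.len b) 2) 0
  if oddGroups > 1 ∨ (oddGroups = 1 ∧ PySem.Int.mod n 2 = 0) then -1
  else (PySem.Dict.values d).foldl (fun t b => t + pvGroupCost b) 0

-- ===== PRECONDITION & SPEC =====
-- Pre_ excludes k = 0 with a nonempty list (Python's `a_i % k` raises ZeroDivisionError) and
-- negative k, which is outside the problem's natural domain (1 ≤ k): there the residue buckets
-- come out in descending order and A's deletion minimum ranges over an accidental candidate set.
def Pre_solve (_n : Int) (k : Int) (a : List Int) : Prop := a = [] ∨ 1 ≤ k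
instance (n : Int) (k : Int) (a : List Int) : Decidable (Pre_solve n k a) := by unfold Pre_solve; infer_instance
def pvWitness_solve : Int × Int × List Int := (1, 3, [1, 2, 3])

def Spec_solve (n : Int) (k : Int) (a : List Int) (out : Int) : Prop := out = solve_alt n k a
instance (n : Int) (k : Int) (a : List Int) (out : Int) : Decidable (Spec_solve n k a out) := by unfold Spec_solve; infer_instance

-- ===== CLAIM (what is proved, stated in full; the proofs are below) =====
def Claim_equal_solve : Prop := ∀ (n : Int) (k : Int) (a : List Int), Dom_solve n k a → Pre_solve n k a → Spec_solve n k a (solve n k a)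

-- ===== LEMMAS AND PROOFS =====
-- alternating signed sum: pvAlt [x0,x1,x2,...] = -x0 + x1 - x2 + ...
def pvAlt : List Int → Int
  | [] => 0
  | x :: t => -x - pvAlt t

-- cost of deleting b[j] and pairing the rest consecutively (A's candidate s_{len-1-j})
def pvCand (b : List Int) (j : Nat) : Int :=
  2 * pvAlt (b.take j) + (if j % 2 = 1 then b.getD j 0 else -b.getD j 0) - pvAlt b

-- minimum of pvCand b 0 ... pvCand b t
def pvDmin (b : List Int) : Nat → Int
  | 0 => pvCand b 0
  | t + 1 => min (pvDmin b t) (pvCand b (t + 1))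

-- B's DP values: pvEv = consecutive pairing cost (even length), pvOd = min-deletion cost (odd length)
def pvEv : List Int → Int
  | [] => 0
  | [_] => 0
  | x :: y :: t => y - x + pvEv t

def pvOd : List Int → Int
  | [] => 0
  | [_] => 0
  | x :: y :: t => min (pvEv (y :: t)) (y - x + pvOd t)

theorem pvAlt_append (u v : List Int) :
    pvAlt (u ++ v) = pvAlt u + (if u.length % 2 = 0 then pvAlt v else -pvAlt v) := by
  induction u with
  | nil => simp [pvAlt]
  | cons x u ih =>
    simp only [List.cons_append, pvAlt, ih, List.length_cons]
    rcases Nat.even_or_odd u.length with h | h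
    · have h0 : u.length % 2 = 0 := Nat.even_iff.mp h
      have h1 : (u.length + 1) % 2 = 1 := by omega
      simp [h0, h1]; ring
    · have h0 : u.length % 2 = 1 := Nat.odd_iff.mp h
      have h1 : (u.length + 1) % 2 = 0 := by omega
      simp [h0, h1]; ring

theorem pvAlt_take_succ (b : List Int) (j : Nat) (h : j < b.length) :
    pvAlt (b.take (j + 1)) = pvAlt (b.take j) + (if j % 2 = 1 then b.getD j 0 else -b.getD j 0) := by
  have ht : b.take (j + 1) = b.take j ++ [b[j]] := by
    rw [List.take_add_one, List.getElem?_eq_getElem h]; rfl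
  rw [ht, pvAlt_append]
  have hl : (b.take j).length = j := by simp [List.length_take]; omega
  have hg : b.getD j 0 = b[j] := by simp [List.getD_eq_getElem?_getD, List.getElem?_eq_getElem h]
  rcases Nat.even_or_odd j with hj | hj
  · have h0 : j % 2 = 0 := Nat.even_iff.mp hj
    simp [hl, h0, pvAlt, List.getElem?_eq_getElem h]
  · have h0 : j % 2 = 1 := Nat.odd_iff.mp hj
    simp [hl, h0, pvAlt, List.getElem?_eq_getElem h]

-- the recurrence A's backward state machine steps along
theorem pvCand_rec (b : List Int) (j : Nat) (h : j + 2 ≤ b.length) :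
    pvCand b j = pvCand b (j + 1)
      + (b.getD (j + 1) 0 - b.getD j 0) * (if (j + 1) % 2 = 0 then 1 else -1) := by
  unfold pvCand
  rw [pvAlt_take_succ b j (by omega)]
  rcases Nat.even_or_odd j with hj | hj
  · have h0 : j % 2 = 0 := Nat.even_iff.mp hj
    have h1 : (j + 1) % 2 = 1 := by omega
    simp only [h0, h1]
    norm_num
    ring
  · have h0 : j % 2 = 1 := Nat.odd_iff.mp hj
    have h1 : (j + 1) % 2 = 0 := by omega
    simp only [h0, h1]
    norm_num
    ring

theorem pvCand_last (b : List Int) (h : b.length % 2 = 1) :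
    pvCand b (b.length - 1) = pvAlt (b.take (b.length - 1)) := by
  have hlen : 1 ≤ b.length := by omega
  have hb : pvAlt b = pvAlt (b.take ((b.length - 1) + 1)) := by
    rw [Nat.sub_add_cancel hlen, List.take_length]
  unfold pvCand
  rw [hb, pvAlt_take_succ b (b.length - 1) (by omega)]
  have h0 : (b.length - 1) % 2 = 0 := by omega
  simp only [h0]
  norm_num
  ring

-- Nat-indexed core of the pair-difference sums
theorem pvPairFold_core (b : List Int) : ∀ (m : Nat) (s0 : Int), 2 * m ≤ b.length →
    (List.range m).foldl (fun s k => s + (b.getD (2 * k + 1) 0 - b.getD (2 * k) 0)) s0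
      = s0 + pvAlt (b.take (2 * m)) := by
  intro m
  induction m with
  | zero => intro s0 _; simp [pvAlt]
  | succ m ih =>
    intro s0 hm
    rw [List.range_succ, List.foldl_append]
    rw [ih s0 (by omega)]
    simp only [List.foldl_cons, List.foldl_nil]
    have e1 : 2 * (m + 1) = (2 * m + 1) + 1 := by ring
    rw [e1, pvAlt_take_succ b (2 * m + 1) (by omega), pvAlt_take_succ b (2 * m) (by omega)]
    have h0 : (2 * m) % 2 = 0 := by omega
    have h1 : (2 * m + 1) % 2 = 1 := by omega
    simp only [h0, h1]
    norm_num
    ring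

theorem pvPairDiffFold_eq (b : List Int) (s0 : Int) :
    pvPairDiffFold b s0 = s0 + pvAlt (b.take (2 * (b.length / 2))) := by
  unfold pvPairDiffFold
  rw [PySem.List.pyRange_of_pos 0 (PySem.List.len b - 1) (by norm_num)]
  have hc : (if (0:Int) < PySem.List.len b - 1
      then ((PySem.List.len b - 1 - 0 + 2 - 1) / 2).toNat else 0) = b.length / 2 := by
    simp only [PySem.List.len_eq]
    split <;> omega
  rw [hc, List.foldl_map]
  rw [PySem.List.foldl_congr_mem _ _
    (fun s k => s + (b.getD (2 * k + 1) 0 - b.getD (2 * k) 0)) s0 ?_]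
  · exact pvPairFold_core b (b.length / 2) s0 (by omega)
  · intro acc k hk
    have e1 : (0 : Int) + 2 * (k : Int) + 1 = ((2 * k + 1 : Nat) : Int) := by push_cast; ring
    have e2 : (0 : Int) + 2 * (k : Int) = ((2 * k : Nat) : Int) := by push_cast; ring
    rw [e1, e2, PySem.List.pyGetD_natCast, PySem.List.pyGetD_natCast]

theorem pvModCast (k : Nat) : PySem.Int.mod (k : Int) 2 = ((k % 2 : Nat) : Int) := by
  exact_mod_cast PySem.Int.mod_natCast k 2

theorem pvStepA_eq (b : List Int) (j : Nat) (h : j + 2 ≤ b.length) (s : Int) :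
    pvStepA b (pvCand b (j + 1), (if (j + 1) % 2 = 0 then (1:Int) else -1), s) ((j : Int) + 1)
      = (pvCand b j, (if j % 2 = 0 then (1:Int) else -1), min s (pvCand b j)) := by
  simp only [pvStepA]
  have g1 : PySem.List.pyGetD b ((j : Int) + 1) 0 = b.getD (j + 1) 0 := by
    have e : ((j : Int) + 1) = ((j + 1 : Nat) : Int) := by push_cast; ring
    rw [e, PySem.List.pyGetD_natCast]
  have g0 : PySem.List.pyGetD b ((j : Int) + 1 - 1) 0 = b.getD j 0 := by
    have e : ((j : Int) + 1 - 1) = ((j : Nat) : Int) := by ring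
    rw [e, PySem.List.pyGetD_natCast]
  rw [g1, g0]
  have hfirst : pvCand b (j + 1)
      + (b.getD (j + 1) 0 - b.getD j 0) * (if (j + 1) % 2 = 0 then (1:Int) else -1)
      = pvCand b j := (pvCand_rec b j h).symm
  have hsig : (if (j + 1) % 2 = 0 then (1:Int) else -1) * -1
      = (if j % 2 = 0 then (1:Int) else -1) := by
    rcases Nat.even_or_odd j with hj | hj
    · have h0 : j % 2 = 0 := Nat.even_iff.mp hj
      have h1 : (j + 1) % 2 = 1 := by omega
      simp [h0, h1]
    · have h0 : j % 2 = 1 := Nat.odd_iff.mp hj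
      have h1 : (j + 1) % 2 = 0 := by omega
      simp [h0, h1]
  rw [hfirst, hsig]

-- invariant of A's backward loop
theorem pvLoopA_inv (b : List Int) : ∀ (t : Nat), t + 2 ≤ b.length → ∀ (s : Int),
    ((PySem.List.pyRange ((t : Int) + 1) 0 (-1)).foldl (pvStepA b)
      (pvCand b (t + 1), (if (t + 1) % 2 = 0 then (1 : Int) else -1), s)).2.2
      = min s (pvDmin b t) := by
  intro t
  induction t with
  | zero =>
    intro ht s
    have hstep := pvStepA_eq b 0 ht s
    have hg : ((0:Nat) : Int) + 1 = 1 := by norm_num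
    rw [hg] at *
    norm_num at hstep ⊢
    rw [PySem.List.pyRange_neg_one_cons (by norm_num : (0:Int) < 1)]
    norm_num [hstep, pvDmin]
  | succ t ih =>
    intro ht s
    have hr : PySem.List.pyRange (((t + 1 : Nat) : Int) + 1) 0 (-1)
        = (((t + 1 : Nat) : Int) + 1) :: PySem.List.pyRange ((t : Int) + 1) 0 (-1) := by
      rw [PySem.List.pyRange_neg_one_cons (by omega)]
      congr 1
      push_cast
      ring_nf
    rw [hr]
    simp only [List.foldl_cons]
    have hstep := pvStepA_eq b (t + 1) (by omega) s
    rw [hstep]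
    rw [ih (by omega) (min s (pvCand b (t + 1)))]
    show min (min s (pvCand b (t + 1))) (pvDmin b t) = min s (pvDmin b (t + 1))
    rw [pvDmin, min_assoc, min_comm (pvCand b (t + 1))]

theorem pvOddA_eq (b : List Int) (h : b.length % 2 = 1) :
    pvOddA b = pvDmin b (b.length - 1) := by
  have key : ∀ s0 : Int, s0 = pvCand b (b.length - 1) →
      ((PySem.List.pyRange (PySem.List.len b - 1) 0 (-1)).foldl (pvStepA b) (s0, 1, s0)).2.2
        = pvDmin b (b.length - 1) := by
    intro s0 hs0
    subst hs0
    by_cases h1 : b.length = 1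
    · have h0 : b.length - 1 = 0 := by omega
      rw [h0, PySem.List.len_eq, h1]
      norm_num [pvDmin]
    · have hge : 3 ≤ b.length := by omega
      have e : PySem.List.len b - 1 = ((b.length - 2 : Nat) : Int) + 1 := by
        rw [PySem.List.len_eq]; omega
      have e2 : b.length - 1 = (b.length - 2) + 1 := by omega
      rw [e, e2]
      have esig : (if ((b.length - 2) + 1) % 2 = 0 then (1:Int) else -1) = 1 := by
        have hp : ((b.length - 2) + 1) % 2 = 0 := by omega
        simp [hp]
      have hinv := pvLoopA_inv b (b.length - 2) (by omega) (pvCand b ((b.length - 2) + 1))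
      rw [esig] at hinv
      rw [hinv, pvDmin]
      exact min_comm _ _
  unfold pvOddA
  exact key _ (by
    rw [pvPairDiffFold_eq]
    have h2 : 2 * (b.length / 2) = b.length - 1 := by omega
    rw [h2, zero_add, ← pvCand_last b h])

-- pvEv is the alternating sum on even-length lists
theorem pvEv_eq_pvAlt (b : List Int) (h : b.length % 2 = 0) : pvEv b = pvAlt b := by
  induction b using pvEv.induct with
  | case1 => simp [pvEv, pvAlt]
  | case2 x => simp at h
  | case3 x y t ih =>
    have ht : t.length % 2 = 0 := by simp at h; omega
    simp only [pvEv, pvAlt, ih ht]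
    ring

theorem pvCand_zero (x : Int) (t : List Int) : pvCand (x :: t) 0 = pvAlt t := by
  simp [pvCand, pvAlt]

theorem pvCand_shift (x y : Int) (t : List Int) (j : Nat) :
    pvCand (x :: y :: t) (j + 2) = (y - x) + pvCand t j := by
  unfold pvCand
  have htake : (x :: y :: t).take (j + 2) = x :: y :: t.take j := rfl
  have hget : (x :: y :: t).getD (j + 2) 0 = t.getD j 0 := rfl
  have hpar : (j + 2) % 2 = j % 2 := by omega
  rw [htake, hget, hpar]
  simp only [pvAlt]
  split_ifs <;> ring

theorem pvDmin_le (b : List Int) : ∀ (t j : Nat), j ≤ t → pvDmin b t ≤ pvCand b j := by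
  intro t
  induction t with
  | zero =>
    intro j hj
    have hj0 : j = 0 := by omega
    subst hj0
    simp [pvDmin]
  | succ t ih =>
    intro j hj
    rcases Nat.lt_or_ge j (t + 1) with h | h
    · exact le_trans (min_le_left _ _) (ih j (by omega))
    · have : j = t + 1 := by omega
      subst this
      exact min_le_right _ _

theorem le_pvDmin (b : List Int) : ∀ (t : Nat) (c : Int), (∀ j, j ≤ t → c ≤ pvCand b j) → c ≤ pvDmin b t := by
  intro t
  induction t with
  | zero => intro c h; exact h 0 (le_refl _)
  | succ t ih =>
    intro c h
    exact le_min (ih c (fun j hj => h j (by omega))) (h (t + 1) (le_refl _))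

-- B's DP value is a lower bound for every deletion candidate (sorted, odd length)
theorem pvOd_le_cand : ∀ (b : List Int), b.length % 2 = 1 → b.Pairwise (· ≤ ·) →
    ∀ j, j < b.length → pvOd b ≤ pvCand b j := by
  intro b
  induction b using pvOd.induct with
  | case1 => intro h; simp at h
  | case2 x =>
    intro _ _ j hj
    have hj0 : j = 0 := by simp at hj; omega
    subst hj0
    simp [pvOd, pvCand, pvAlt]
  | case3 x y t ih =>
    intro hlen hsort j hj
    have hto : t.length % 2 = 1 := by simp at hlen; omega
    have htne : t ≠ [] := by intro h; rw [h] at hto; simp at hto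
    have hts : t.Pairwise (· ≤ ·) := (List.pairwise_cons.mp (List.pairwise_cons.mp hsort).2).2
    match j, hj with
    | 0, _ =>
      rw [pvCand_zero]
      have : pvEv (y :: t) = pvAlt (y :: t) := by
        apply pvEv_eq_pvAlt; simp at hlen ⊢; omega
      exact le_trans (min_le_left _ _) (le_of_eq this)
    | 1, _ =>
      -- pvCand b 1 = pvCand b 2 + (b[2] - b[1]) ≥ pvCand b 2 since sorted
      obtain ⟨z, t', rfl⟩ : ∃ z t', t = z :: t' := by
        cases t with | nil => exact absurd rfl htne | cons z t' => exact ⟨z, t', rfl⟩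
      have hrec := pvCand_rec (x :: y :: z :: t') 1 (by simp)
      have hyz : y ≤ z := (List.pairwise_cons.mp (List.pairwise_cons.mp hsort).2).1 z (by simp)
      have hget1 : (x :: y :: z :: t').getD 1 0 = y := rfl
      have hget2 : (x :: y :: z :: t').getD 2 0 = z := rfl
      rw [hget1, hget2] at hrec
      norm_num at hrec
      have h2 : pvCand (x :: y :: z :: t') 2 = (y - x) + pvCand (z :: t') 0 :=
        pvCand_shift x y (z :: t') 0
      have hc0 : pvOd (z :: t') ≤ pvCand (z :: t') 0 := ih hto hts 0 (by simp)
      have : pvOd (x :: y :: z :: t') ≤ (y - x) + pvOd (z :: t') := min_le_right _ _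
      linarith
    | (j' + 2), hj =>
      rw [pvCand_shift]
      have hc : pvOd t ≤ pvCand t j' := ih hto hts j' (by simp at hj; omega)
      have : pvOd (x :: y :: t) ≤ (y - x) + pvOd t := min_le_right _ _
      linarith

-- B's DP value is attained by some deletion candidate (odd length)
theorem pvOd_attained : ∀ (b : List Int), b.length % 2 = 1 →
    ∃ j, j < b.length ∧ pvCand b j = pvOd b := by
  intro b
  induction b using pvOd.induct with
  | case1 => intro h; simp at h
  | case2 x =>
    intro _
    exact ⟨0, by simp, by simp [pvOd, pvCand, pvAlt]⟩
  | case3 x y t ih =>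
    intro hlen
    have hto : t.length % 2 = 1 := by simp at hlen; omega
    rcases le_total (pvEv (y :: t)) ((y - x) + pvOd t) with h | h
    · refine ⟨0, by simp, ?_⟩
      rw [pvCand_zero]
      have he : pvEv (y :: t) = pvAlt (y :: t) := by
        apply pvEv_eq_pvAlt; simp at hlen ⊢; omega
      rw [pvOd, min_eq_left h, ← he]
    · obtain ⟨j', hj', hcj'⟩ := ih hto
      refine ⟨j' + 2, by simp; omega, ?_⟩
      rw [pvCand_shift, hcj', pvOd, min_eq_right h]

theorem pvOd_eq_pvDmin (b : List Int) (h : b.length % 2 = 1) (hs : b.Pairwise (· ≤ ·)) :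
    pvDmin b (b.length - 1) = pvOd b := by
  apply le_antisymm
  · obtain ⟨j, hj, hcj⟩ := pvOd_attained b h
    calc pvDmin b (b.length - 1) ≤ pvCand b j := pvDmin_le b _ j (by omega)
      _ = pvOd b := hcj
  · exact le_pvDmin b _ _ (fun j hj => pvOd_le_cand b h hs j (by omega))

-- the state of B's backward DP after all indices ≥ i have been processed
def pvStateAt (b : List Int) (i : Nat) : Int × Int :=
  if (b.length - i) % 2 = 0 then (pvEv (b.drop i), pvOd (b.drop (i + 1)))
  else (pvEv (b.drop (i + 1)), pvOd (b.drop i))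

theorem pvStepG_eq (b : List Int) (i : Nat) (h : i + 2 ≤ b.length) :
    pvStepG b (PySem.List.len b) (pvStateAt b (i + 1)) (i : Int) = pvStateAt b i := by
  have hmod : PySem.Int.mod (PySem.List.len b - (i : Int)) 2 = (((b.length - i) % 2 : Nat) : Int) := by
    have e : PySem.List.len b - (i : Int) = ((b.length - i : Nat) : Int) := by
      rw [PySem.List.len_eq]; omega
    rw [e, pvModCast]
  have g1 : PySem.List.pyGetD b ((i : Int) + 1) 0 = b.getD (i + 1) 0 := by
    have e : ((i : Int) + 1) = ((i + 1 : Nat) : Int) := by push_cast; ring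
    rw [e, PySem.List.pyGetD_natCast]
  have g0 : PySem.List.pyGetD b (i : Int) 0 = b.getD i 0 := PySem.List.pyGetD_natCast b i 0
  have hdrop : b.drop i = b[i] :: b[i + 1] :: b.drop (i + 1 + 1) := by
    rw [List.drop_eq_getElem_cons (by omega), List.drop_eq_getElem_cons (by omega)]
    rfl
  have hbi : b.getD i 0 = b[i] := List.getD_eq_getElem b 0 (by omega)
  have hbi1 : b.getD (i + 1) 0 = b[i + 1] := List.getD_eq_getElem b 0 (by omega)
  have hdrop1 : b.drop (i + 1) = b[i + 1] :: b.drop (i + 1 + 1) := List.drop_eq_getElem_cons (by omega)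
  have hEv : pvEv (b.drop i) = (b.getD (i + 1) 0 - b.getD i 0) + pvEv (b.drop (i + 1 + 1)) := by
    rw [hdrop, hbi, hbi1]; rfl
  have hOd : pvOd (b.drop i)
      = min (pvEv (b.drop (i + 1))) ((b.getD (i + 1) 0 - b.getD i 0) + pvOd (b.drop (i + 1 + 1))) := by
    rw [hdrop, hbi, hbi1, pvOd, ← hdrop1]
  rcases Nat.even_or_odd (b.length - i) with hp | hp
  · have h0 : (b.length - i) % 2 = 0 := Nat.even_iff.mp hp
    have h1 : (b.length - (i + 1)) % 2 = 1 := by omega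
    have hc : PySem.Int.mod (PySem.List.len b - (i : Int)) 2 = 0 := by rw [hmod, h0]; rfl
    unfold pvStepG pvStateAt
    rw [if_pos hc, if_neg (by omega), if_pos h0, g1, g0]
    exact Prod.ext (by rw [hEv]) rfl
  · have h0 : (b.length - i) % 2 = 1 := Nat.odd_iff.mp hp
    have h1 : (b.length - (i + 1)) % 2 = 0 := by omega
    have hc : ¬ PySem.Int.mod (PySem.List.len b - (i : Int)) 2 = 0 := by
      rw [hmod, h0]; norm_num
    unfold pvStepG pvStateAt
    rw [if_neg hc, if_pos h1, if_neg (by omega), g1, g0]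
    exact Prod.ext rfl (by rw [hOd])

theorem pvFoldG_inv (b : List Int) : ∀ (j : Nat), j + 2 ≤ b.length →
    (PySem.List.pyRange (j : Int) (-1) (-1)).foldl (pvStepG b (PySem.List.len b)) (pvStateAt b (j + 1))
      = pvStateAt b 0 := by
  intro j
  induction j with
  | zero =>
    intro hj
    simp only [Nat.cast_zero]
    rw [PySem.List.pyRange_neg_one_cons (by norm_num : (-1:Int) < 0),
      show (0:Int) - 1 = -1 by ring,
      PySem.List.pyRange_neg_one_eq_nil (le_refl (-1:Int))]
    simp only [List.foldl_cons, List.foldl_nil]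
    have hstep := pvStepG_eq b 0 hj
    simpa using hstep
  | succ j ih =>
    intro hj
    have hr : PySem.List.pyRange ((j + 1 : Nat) : Int) (-1) (-1)
        = ((j + 1 : Nat) : Int) :: PySem.List.pyRange ((j : Nat) : Int) (-1) (-1) := by
      rw [PySem.List.pyRange_neg_one_cons (by omega)]
      congr 1
      push_cast
      ring_nf
    rw [hr, List.foldl_cons, pvStepG_eq b (j + 1) (by omega)]
    exact ih (by omega)

-- B's per-group loop computes pvOd / pvEv
theorem pvGroupCost_eq (b : List Int) :
    pvGroupCost b = if b.length % 2 = 1 then pvOd b else pvEv b := by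
  show (if PySem.Int.mod (PySem.List.len b) 2 = 1
      then ((PySem.List.pyRange (PySem.List.len b - 2) (-1) (-1)).foldl
        (pvStepG b (PySem.List.len b)) ((0 : Int), (0 : Int))).2
      else ((PySem.List.pyRange (PySem.List.len b - 2) (-1) (-1)).foldl
        (pvStepG b (PySem.List.len b)) ((0 : Int), (0 : Int))).1) = _
  have hmod : PySem.Int.mod (PySem.List.len b) 2 = ((b.length % 2 : Nat) : Int) := by
    rw [PySem.List.len_eq, pvModCast]
  rcases Nat.lt_or_ge b.length 2 with hlen | hlen
  · have hnil : PySem.List.pyRange (PySem.List.len b - 2) (-1) (-1) = [] := by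
      apply PySem.List.pyRange_neg_one_eq_nil
      rw [PySem.List.len_eq]; omega
    rw [hnil]
    simp only [List.foldl_nil, hmod]
    match b, hlen with
    | [], _ => norm_num [pvEv]
    | [x], _ => norm_num [pvOd]
  · have e : PySem.List.len b - 2 = ((b.length - 2 : Nat) : Int) := by
      rw [PySem.List.len_eq]; omega
    have hinit : ((0 : Int), (0 : Int)) = pvStateAt b ((b.length - 2) + 1) := by
      unfold pvStateAt
      have h1 : (b.length - (b.length - 2 + 1)) % 2 = 1 := by omega
      simp only [h1]
      norm_num
      constructor
      · have : b.drop (b.length - 2 + 1 + 1) = [] := List.drop_eq_nil_of_le (by omega)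
        rw [this]; rfl
      · have hlast : (b.drop (b.length - 2 + 1)).length = 1 := by
          rw [List.length_drop]; omega
        obtain ⟨x, hx⟩ := List.length_eq_one_iff.mp hlast
        rw [hx]; rfl
    rw [e, hinit, pvFoldG_inv b (b.length - 2) (by omega)]
    unfold pvStateAt
    rw [hmod]
    rcases Nat.even_or_odd b.length with hp | hp
    · have h0 : b.length % 2 = 0 := Nat.even_iff.mp hp
      have h00 : (b.length - 0) % 2 = 0 := by omega
      simp only [h0, h00, List.drop_zero]
      norm_num
    · have h0 : b.length % 2 = 1 := Nat.odd_iff.mp hp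
      have h00 : (b.length - 0) % 2 = 1 := by omega
      simp only [h0, h00, List.drop_zero]
      norm_num

-- A's loop against B's staged count-then-sum, for sorted buckets
theorem pvLoop_eq (n : Int) : ∀ (vals : List (List Int)), (∀ b ∈ vals, b.Pairwise (· ≤ ·)) →
    ∀ (ans : Int),
    (pvLoopA n vals ans 0 = if 1 ≤ vals.countP (fun b => b.length % 2 == 1) ∧ PySem.Int.mod n 2 = 0
        ∨ 2 ≤ vals.countP (fun b => b.length % 2 == 1) then -1
      else vals.foldl (fun t b => t + pvGroupCost b) ans)
    ∧ (pvLoopA n vals ans 1 = if 1 ≤ vals.countP (fun b => b.length % 2 == 1) then -1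
      else vals.foldl (fun t b => t + pvGroupCost b) ans) := by
  intro vals
  induction vals with
  | nil => intro _ ans; norm_num [pvLoopA]
  | cons b rest ih =>
    intro hs ans
    have hsb : b.Pairwise (· ≤ ·) := hs b (by simp)
    have hsr : ∀ c ∈ rest, c.Pairwise (· ≤ ·) := fun c hc => hs c (by simp [hc])
    have hmod : PySem.Int.mod (PySem.List.len b) 2 = ((b.length % 2 : Nat) : Int) := by
      rw [PySem.List.len_eq, pvModCast]
    by_cases hb : b.length % 2 = 1
    · have hbm : PySem.Int.mod (PySem.List.len b) 2 = 1 := by rw [hmod, hb]; rfl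
      have hcount : (b :: rest).countP (fun b => b.length % 2 == 1)
          = rest.countP (fun b => b.length % 2 == 1) + 1 := by
        rw [List.countP_cons]; simp [hb]
      have hcost : pvOddA b = pvGroupCost b := by
        rw [pvGroupCost_eq, if_pos hb, pvOddA_eq b hb, pvOd_eq_pvDmin b hb hsb]
      by_cases hn : PySem.Int.mod n 2 = 0
      · constructor
        · simp only [pvLoopA, if_pos hbm, if_pos hn]
          rw [hcount, if_pos (by left; exact ⟨by omega, hn⟩)]
        · simp only [pvLoopA, if_pos hbm, if_pos hn]
          rw [hcount, if_pos (by omega)]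
      · constructor
        · have h01 : ¬ ((1:Int) > 1) := by norm_num
          simp only [pvLoopA, if_pos hbm, if_neg hn, zero_add, if_neg h01]
          rw [hcost, (ih hsr (ans + pvGroupCost b)).2, hcount]
          by_cases hrc : 1 ≤ rest.countP (fun b => b.length % 2 == 1)
          · rw [if_pos hrc, if_pos (by right; omega)]
          · rw [if_neg hrc, if_neg (by
              rintro (⟨-, hmn⟩ | hge2)
              · exact hn hmn
              · omega)]
            rw [List.foldl_cons]
        · have h11 : ((1:Int) + 1 > 1) := by norm_num
          simp only [pvLoopA, if_pos hbm, if_neg hn, if_pos h11]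
          rw [hcount, if_pos (by omega)]
    · have hb0 : b.length % 2 = 0 := by omega
      have hbm : ¬ PySem.Int.mod (PySem.List.len b) 2 = 1 := by
        rw [hmod, hb0]; norm_num
      have hcount : (b :: rest).countP (fun b => b.length % 2 == 1)
          = rest.countP (fun b => b.length % 2 == 1) := by
        rw [List.countP_cons]; simp [hb]
      have hcost : pvPairDiffFold b ans = ans + pvGroupCost b := by
        rw [pvGroupCost_eq, if_neg (by omega), pvPairDiffFold_eq]
        have h2 : 2 * (b.length / 2) = b.length := by omega
        rw [h2, List.take_length, pvEv_eq_pvAlt b hb0]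
      constructor
      · have h0 : ¬ ((0:Int) > 1) := by norm_num
        simp only [pvLoopA, if_neg hbm, if_neg h0]
        rw [hcost, (ih hsr (ans + pvGroupCost b)).1, hcount, List.foldl_cons]
      · have h1 : ¬ ((1:Int) > 1) := by norm_num
        simp only [pvLoopA, if_neg hbm, if_neg h1]
        rw [hcost, (ih hsr (ans + pvGroupCost b)).2, hcount, List.foldl_cons]

-- each bucket of the residue dict built from the sorted list is sorted (for 1 ≤ k)
theorem pvBuckets_sorted (k : Int) (hk : 1 ≤ k) (aS : List Int) (hs : aS.Pairwise (· ≤ ·)) :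
    ∀ b ∈ PySem.Dict.values (aS.foldl (fun d x =>
      PySem.Dict.modify d (PySem.Int.mod x k) [] (fun l => l ++ [PySem.Int.floordiv x k]))
      PySem.Dict.empty), b.Pairwise (· ≤ ·) := by
  intro b hb
  set f : Int → Int × Int := fun x => (PySem.Int.mod x k, PySem.Int.floordiv x k) with hf
  have hfold : aS.foldl (fun d x =>
      PySem.Dict.modify d (PySem.Int.mod x k) [] (fun l => l ++ [PySem.Int.floordiv x k]))
      PySem.Dict.empty
      = (aS.map f).foldl (fun d p => PySem.Dict.modify d p.1 [] (fun l => l ++ [p.2]))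
        PySem.Dict.empty := by
    rw [List.foldl_map]
  rw [hfold] at hb
  set d := (aS.map f).foldl (fun d p => PySem.Dict.modify d p.1 [] (fun l => l ++ [p.2]))
    PySem.Dict.empty with hd
  have hnodup : d.keys.Nodup := by
    rw [hd]
    exact PySem.Dict.nodup_keys_foldl_modify_key (aS.map f) Prod.fst []
      (fun _ p => fun l => l ++ [p.2]) PySem.Dict.empty (by simp [PySem.Dict.keys_empty])
  rw [PySem.Dict.values_eq_map_keys d hnodup []] at hb
  obtain ⟨r, _, hbr⟩ := List.mem_map.mp hb
  have hchar : d.getD r [] = ((aS.filter (fun x => PySem.Int.mod x k == r)).map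
      (fun x => PySem.Int.floordiv x k)) := by
    rw [hd, PySem.Dict.getD_foldl_modify_append, PySem.Dict.getD_empty]
    rw [List.filter_map]
    simp only [List.nil_append, List.map_map]
    rfl
  rw [hchar] at hbr
  rw [← hbr]
  refine List.Pairwise.map _ ?_ (hs.filter _)
  intro p q hpq
  rw [PySem.Int.floordiv_eq_ediv_of_pos (by omega), PySem.Int.floordiv_eq_ediv_of_pos (by omega)]
  exact Int.ediv_le_ediv (by omega) hpq

-- B's odd-group count loop
theorem pvOddCount_eq : ∀ (vals : List (List Int)) (c : Int),
    vals.foldl (fun c b => c + PySem.Int.mod (PySem.List.len b) 2) c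
      = c + (vals.countP (fun b => b.length % 2 == 1) : Int) := by
  intro vals
  induction vals with
  | nil => intro c; simp
  | cons b rest ih =>
    intro c
    have hmod : PySem.Int.mod (PySem.List.len b) 2 = ((b.length % 2 : Nat) : Int) := by
      rw [PySem.List.len_eq, pvModCast]
    simp only [List.foldl_cons, List.countP_cons, ih, hmod]
    by_cases hb : b.length % 2 = 1
    · simp [hb]; ring
    · have hb0 : b.length % 2 = 0 := by omega
      simp [hb0]

-- ===== VERDICT (by name: the statement is the Claim_ definition above) =====
theorem solve_spec : Claim_equal_solve := by
  intro n k a _ hpre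
  unfold Spec_solve solve solve_alt
  rcases hpre with rfl | hk
  · norm_num [PySem.List.sorted, PySem.List.insertBy, PySem.Dict.values, PySem.Dict.empty,
      pvLoopA, PySem.Dict.items]
  · have hsorted : (PySem.List.sorted a (fun x => x) false).Pairwise (· ≤ ·) :=
      PySem.List.sorted_pairwise a (fun x => x)
    set aS := PySem.List.sorted a (fun x => x) false
    set d := aS.foldl (fun d x =>
      PySem.Dict.modify d (PySem.Int.mod x k) [] (fun l => l ++ [PySem.Int.floordiv x k]))
      PySem.Dict.empty with hd
    have hbs : ∀ b ∈ PySem.Dict.values d, b.Pairwise (· ≤ ·) :=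
      pvBuckets_sorted k hk aS hsorted
    have hmain := (pvLoop_eq n (PySem.Dict.values d) hbs 0).1
    show pvLoopA n (PySem.Dict.values d) 0 0
      = (if (PySem.Dict.values d).foldl (fun c b => c + PySem.Int.mod (PySem.List.len b) 2) 0 > 1
            ∨ ((PySem.Dict.values d).foldl (fun c b => c + PySem.Int.mod (PySem.List.len b) 2) 0 = 1
               ∧ PySem.Int.mod n 2 = 0) then -1
         else (PySem.Dict.values d).foldl (fun t b => t + pvGroupCost b) 0)
    rw [hmain, pvOddCount_eq]
    set oc := (PySem.Dict.values d).countP (fun b => b.length % 2 == 1) with hoc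
    have hiff : (1 ≤ oc ∧ PySem.Int.mod n 2 = 0 ∨ 2 ≤ oc)
        ↔ ((0:Int) + (oc:Int) > 1 ∨ ((0:Int) + (oc:Int) = 1 ∧ PySem.Int.mod n 2 = 0)) := by
      constructor
      · rintro (⟨h1, hm⟩ | h2)
        · rcases Nat.lt_or_ge oc 2 with h | h
          · right; exact ⟨by omega, hm⟩
          · left; omega
        · left; omega
      · rintro (h | ⟨h1, hm⟩)
        · right; omega
        · left; exact ⟨by omega, hm⟩
    rw [if_congr hiff rfl rfl]
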